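-- pv_equiv track=rewrite | github.com/xme1ez/python | basic/search_parameters_for_quadratic_equation.py | search_parameters_for_quadratic_equation
-- ===== SOURCE A (Python) =====
-- import math
--
-- def search_parameters_for_quadratic_equation(mina, maxa, minb, maxb, minc, maxc):
--
-- 	list_of_possible_combinations = []
--
-- 	for a in range(mina, maxa + 1):
-- 		for b in range(minb, maxb + 1):
-- 			for c in range(minc, maxc + 1):
-- 				d = math.pow(b, 2) - 4 * a * c
--
-- 				if d < 0:
-- 					continue
-- 				elif d == 0 or d > 0:
-- 					list_of_possible_combinations.append((a, b, c))
--
-- 	return list_of_possible_combinations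
-- ===== SOURCE B (Python) =====
-- def search_parameters_for_quadratic_equation(mina, maxa, minb, maxb, minc, maxc):
--     result = []
--     for a in range(mina, maxa + 1):
--         for b in range(minb, maxb + 1):
--             if a > 0:
--                 lo, hi = minc, min(maxc, b * b // (4 * a))
--             elif a < 0:
--                 lo, hi = max(minc, -(b * b // (4 * (-a)))), maxc
--             else:
--                 lo, hi = minc, maxc
--             result.extend((a, b, c) for c in range(lo, hi + 1))
--     return result
-- ===== Notes on version B (the rewrite author's own statement) =====
-- stated objective: alternative
-- what changed: Instead of testing every c in the innermost loop, B solves 4ac <= b^2 for c per (a,b) pair and emits the resulting contiguous c-range directly, removing the inner per-c discriminant test (and it uses exact integer arithmetic where A uses math.pow floats).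
import Mathlib
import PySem

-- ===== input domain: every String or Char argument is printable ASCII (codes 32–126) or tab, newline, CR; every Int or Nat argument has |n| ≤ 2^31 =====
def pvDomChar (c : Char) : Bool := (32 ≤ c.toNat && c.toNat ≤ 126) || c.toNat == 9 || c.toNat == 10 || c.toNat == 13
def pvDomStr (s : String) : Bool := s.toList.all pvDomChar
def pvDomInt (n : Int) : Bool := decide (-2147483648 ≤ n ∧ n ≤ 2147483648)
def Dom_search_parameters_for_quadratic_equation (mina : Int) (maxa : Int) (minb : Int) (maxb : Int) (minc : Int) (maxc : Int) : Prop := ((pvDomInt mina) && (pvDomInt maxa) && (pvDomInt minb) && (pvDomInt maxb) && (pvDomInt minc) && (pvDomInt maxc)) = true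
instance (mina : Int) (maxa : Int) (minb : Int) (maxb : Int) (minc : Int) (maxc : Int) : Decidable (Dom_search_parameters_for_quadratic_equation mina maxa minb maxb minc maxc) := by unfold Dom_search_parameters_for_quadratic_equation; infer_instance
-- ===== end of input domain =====

-- ===== PORT A =====
-- B vs A: per (a,b), B computes the valid contiguous c-range from 4ac ≤ b² and emits it directly,
-- removing A's innermost per-c discriminant test. Pre_ below restricts to the range
-- where A's math.pow float discriminant has the exact integer sign, so the integer port of A is faithful there.
def search_parameters_for_quadratic_equation (mina : Int) (maxa : Int) (minb : Int) (maxb : Int) (minc : Int) (maxc : Int) : List (Int × Int × Int) :=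
  (PySem.List.pyRange mina (maxa + 1) 1).foldl (fun acc a =>
    (PySem.List.pyRange minb (maxb + 1) 1).foldl (fun acc b =>
      (PySem.List.pyRange minc (maxc + 1) 1).foldl (fun acc c =>
        -- d = math.pow(b, 2) - 4*a*c : ported as the exact integer b*b - 4*a*c, which equals the
        -- float computation's sign/zero behaviour on every input admitted by Pre_ (see Pre_ comment)
        let d := b * b - 4 * a * c
        if d < 0 then acc
        else if d = 0 ∨ d > 0 then acc ++ [(a, b, c)]
        else acc) acc) acc) []

-- ===== PORT B =====
-- helper: the row of triples B emits for one (a,b) pair (the body of B's inner loop)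
def pvSpqRow (a : Int) (b : Int) (minc : Int) (maxc : Int) : List (Int × Int × Int) :=
  if a > 0 then
    (PySem.List.pyRange minc (min maxc (PySem.Int.floordiv (b * b) (4 * a)) + 1) 1).map (fun c => (a, b, c))
  else if a < 0 then
    (PySem.List.pyRange (max minc (-(PySem.Int.floordiv (b * b) (4 * (-a))))) (maxc + 1) 1).map (fun c => (a, b, c))
  else
    (PySem.List.pyRange minc (maxc + 1) 1).map (fun c => (a, b, c))

def search_parameters_for_quadratic_equation_alt (mina : Int) (maxa : Int) (minb : Int) (maxb : Int) (minc : Int) (maxc : Int) : List (Int × Int × Int) :=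
  (PySem.List.pyRange mina (maxa + 1) 1).foldl (fun acc a =>
    (PySem.List.pyRange minb (maxb + 1) 1).foldl (fun acc b =>
      acc ++ pvSpqRow a b minc maxc) acc) []

-- ===== PRECONDITION & SPEC =====
-- Pre_ excludes inputs on which A still returns: when all three ranges are nonempty and the values are so
-- large that b² or 4ac exceeds 2^53, A's float discriminant (math.pow) can have the wrong sign, an artefact
-- of float rounding that an exact integer implementation cannot and should not match.
def Pre_search_parameters_for_quadratic_equation (mina : Int) (maxa : Int) (minb : Int) (maxb : Int) (minc : Int) (maxc : Int) : Prop :=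
  maxa < mina ∨ maxb < minb ∨ maxc < minc ∨
    (max |minb| |maxb| ≤ 94906265 ∧ (max |mina| |maxa|) * (max |minc| |maxc|) ≤ 2251799813685248)
instance (mina : Int) (maxa : Int) (minb : Int) (maxb : Int) (minc : Int) (maxc : Int) : Decidable (Pre_search_parameters_for_quadratic_equation mina maxa minb maxb minc maxc) := by unfold Pre_search_parameters_for_quadratic_equation; infer_instance

def pvWitness_search_parameters_for_quadratic_equation : Int × Int × Int × Int × Int × Int := (-2, 2, -3, 3, -3, 3)

def Spec_search_parameters_for_quadratic_equation (mina : Int) (maxa : Int) (minb : Int) (maxb : Int) (minc : Int) (maxc : Int) (out : List (Int × Int × Int)) : Prop := out = search_parameters_for_quadratic_equation_alt mina maxa minb maxb minc maxc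
instance (mina : Int) (maxa : Int) (minb : Int) (maxb : Int) (minc : Int) (maxc : Int) (out : List (Int × Int × Int)) : Decidable (Spec_search_parameters_for_quadratic_equation mina maxa minb maxb minc maxc out) := by unfold Spec_search_parameters_for_quadratic_equation; infer_instance

-- ===== CLAIM (what is proved, stated in full; the proofs are below) =====
def Claim_equal_search_parameters_for_quadratic_equation : Prop := ∀ (mina : Int) (maxa : Int) (minb : Int) (maxb : Int) (minc : Int) (maxc : Int), Dom_search_parameters_for_quadratic_equation mina maxa minb maxb minc maxc → Pre_search_parameters_for_quadratic_equation mina maxa minb maxb minc maxc → Spec_search_parameters_for_quadratic_equation mina maxa minb maxb minc maxc (search_parameters_for_quadratic_equation mina maxa minb maxb minc maxc)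

-- ===== LEMMAS AND PROOFS =====

-- filtering an integer range by a predicate that (inside the range) is equivalent to membership in a
-- subinterval gives exactly that subrange
lemma pv_filter_pyRange (m n m' n' : Int) (p : Int → Bool)
    (h : ∀ x : Int, (m ≤ x ∧ x < n ∧ p x = true) ↔ (m' ≤ x ∧ x < n')) :
    (PySem.List.pyRange m n 1).filter p = PySem.List.pyRange m' n' 1 := by
  have hmem : ∀ x, x ∈ (PySem.List.pyRange m n 1).filter p ↔ x ∈ PySem.List.pyRange m' n' 1 := by
    intro x
    simp only [List.mem_filter, PySem.List.mem_pyRange_one]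
    constructor
    · rintro ⟨⟨h1, h2⟩, h3⟩; exact (h x).mp ⟨h1, h2, h3⟩
    · intro hx; obtain ⟨h1, h2, h3⟩ := (h x).mpr hx; exact ⟨⟨h1, h2⟩, h3⟩
  have hn1 : ((PySem.List.pyRange m n 1).filter p).Nodup :=
    (PySem.List.nodup_pyRange_one m n).filter p
  have hn2 : (PySem.List.pyRange m' n' 1).Nodup := PySem.List.nodup_pyRange_one m' n'
  have hperm : List.Perm ((PySem.List.pyRange m n 1).filter p) (PySem.List.pyRange m' n' 1) :=
    (List.perm_ext_iff_of_nodup hn1 hn2).mpr hmem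
  have hs1 : ((PySem.List.pyRange m n 1).filter p).Pairwise (· < ·) :=
    (PySem.List.pairwise_lt_pyRange_one m n).filter p
  have hs2 : (PySem.List.pyRange m' n' 1).Pairwise (· < ·) :=
    PySem.List.pairwise_lt_pyRange_one m' n'
  exact hperm.eq_of_pairwise (fun a b _ _ h1 h2 => absurd h2 (lt_asymm h1)) hs1 hs2

-- the filtered c-range of A's inner loop is exactly B's row interval
lemma pv_row_filter (a b minc maxc : Int) :
    ((PySem.List.pyRange minc (maxc + 1) 1).filter (fun c => decide (0 ≤ b * b - 4 * a * c))).map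
      (fun c => (a, b, c)) = pvSpqRow a b minc maxc := by
  unfold pvSpqRow
  rcases lt_trichotomy a 0 with ha | ha | ha
  · rw [if_neg (by omega), if_pos ha]
    congr 1
    apply pv_filter_pyRange
    intro x
    have hpos : (0:Int) < 4 * (-a) := by omega
    have hle := PySem.Int.le_floordiv_iff_mul_le (a := b * b) (b := 4 * (-a)) (q := -x) hpos
    have hmaxl : minc ≤ max minc (-(PySem.Int.floordiv (b * b) (4 * (-a)))) := le_max_left _ _
    have hmaxr : -(PySem.Int.floordiv (b * b) (4 * (-a))) ≤ max minc (-(PySem.Int.floordiv (b * b) (4 * (-a)))) := le_max_right _ _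
    constructor
    · rintro ⟨h1, h2, h3⟩
      simp only [decide_eq_true_eq] at h3
      refine ⟨?_, h2⟩
      have : -x ≤ PySem.Int.floordiv (b * b) (4 * (-a)) := by
        rw [hle]; nlinarith
      have hm : max minc (-(PySem.Int.floordiv (b * b) (4 * (-a)))) ≤ x := max_le h1 (by omega)
      omega
    · rintro ⟨h1, h2⟩
      refine ⟨by omega, h2, ?_⟩
      simp only [decide_eq_true_eq]
      have hx : -x ≤ PySem.Int.floordiv (b * b) (4 * (-a)) := by omega
      rw [hle] at hx; nlinarith
  · subst ha
    rw [if_neg (by omega), if_neg (by omega)]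
    congr 1
    apply pv_filter_pyRange
    intro x
    simp only [decide_eq_true_eq]
    constructor
    · rintro ⟨h1, h2, _⟩; exact ⟨h1, h2⟩
    · rintro ⟨h1, h2⟩; exact ⟨h1, h2, by nlinarith [mul_self_nonneg b]⟩
  · rw [if_pos ha]
    congr 1
    apply pv_filter_pyRange
    intro x
    have hpos : (0:Int) < 4 * a := by omega
    have hle := PySem.Int.le_floordiv_iff_mul_le (a := b * b) (b := 4 * a) (q := x) hpos
    have hminl : min maxc (PySem.Int.floordiv (b * b) (4 * a)) ≤ maxc := min_le_left _ _
    have hminr : min maxc (PySem.Int.floordiv (b * b) (4 * a)) ≤ PySem.Int.floordiv (b * b) (4 * a) := min_le_right _ _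
    constructor
    · rintro ⟨h1, h2, h3⟩
      simp only [decide_eq_true_eq] at h3
      refine ⟨h1, ?_⟩
      have : x ≤ PySem.Int.floordiv (b * b) (4 * a) := by rw [hle]; nlinarith
      have hm : x ≤ min maxc (PySem.Int.floordiv (b * b) (4 * a)) := le_min (by omega) this
      omega
    · rintro ⟨h1, h2⟩
      refine ⟨h1, by omega, ?_⟩
      simp only [decide_eq_true_eq]
      have hx : x ≤ PySem.Int.floordiv (b * b) (4 * a) := by omega
      rw [hle] at hx; nlinarith

-- ===== VERDICT (by name: the statement is the Claim_ definition above) =====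
theorem search_parameters_for_quadratic_equation_spec : Claim_equal_search_parameters_for_quadratic_equation := by
  intro mina maxa minb maxb minc maxc hdom hpre
  unfold Spec_search_parameters_for_quadratic_equation
  unfold search_parameters_for_quadratic_equation search_parameters_for_quadratic_equation_alt
  congr 1
  funext acc a
  congr 1
  funext acc' b
  have h1 : (fun (acc : List (Int × Int × Int)) c =>
      let d := b * b - 4 * a * c
      if d < 0 then acc else if d = 0 ∨ d > 0 then acc ++ [(a, b, c)] else acc)
      = (fun acc c => if (fun c => decide (0 ≤ b * b - 4 * a * c)) c then acc ++ [(fun c => (a, b, c)) c] else acc) := by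
    funext acc c
    simp only []
    by_cases h : b * b - 4 * a * c < 0
    · rw [if_pos h, if_neg (by simpa using (by omega : ¬ (0 ≤ b * b - 4 * a * c)))]
    · rw [if_neg h, if_pos (by omega), if_pos (by simpa using (by omega : 0 ≤ b * b - 4 * a * c))]
  rw [h1, PySem.List.foldl_append_if, pv_row_filter]
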